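-- pv_equiv track=rewrite | github.com/berktinaz/CAB_Algorithm | CAB_Algorithm.py | k_partitions
-- ===== SOURCE A (Python) =====
-- def k_partitions(seq, k):
--
--     n = len(seq)
--     groups = []  # a list of lists, currently empty
--
--     def generate_partitions(i):
--         if i >= n:
--             yield list(map(tuple, groups)) #list of group tuples
--         else:
--             if n - i > k - len(groups): #ensure remaining elements is enough to generate k subsets
--                 for group in groups:
--                     group.append(seq[i]) #add to current sublists
--                     yield from generate_partitions(i + 1) #generate it's own subgroup
--                     group.pop()
--
--             if len(groups) < k: #make sure length is k
--                 groups.append([seq[i]])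
--                 yield from generate_partitions(i + 1)
--                 groups.pop()
--
--     return generate_partitions(0)
-- ===== SOURCE B (Python) =====
-- def k_partitions(seq, k):
--     # Iterative level-by-level (breadth-first) enumeration: one pass over seq,
--     # maintaining the list of all partial partitions (tuples, immutable).
--     n = len(seq)
--
--     def gen():
--         states = [()]
--         for i, x in enumerate(seq):
--             nxt = []
--             for groups in states:
--                 if n - i > k - len(groups):
--                     for j in range(len(groups)):
--                         nxt.append(groups[:j] + (groups[j] + (x,),) + groups[j + 1:])
--                 if len(groups) < k:
--                     nxt.append(groups + ((x,),))
--             states = nxt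
--         for groups in states:
--             yield list(groups)
--
--     return gen()
-- ===== Notes on version B (the rewrite author's own statement) =====
-- stated objective: alternative
-- what changed: Replaces A's recursive backtracking generator with mutable shared state (append/yield-from/pop) by a single iterative pass over seq that expands a frontier of immutable partial partitions level by level, yielding the final frontier.
import Mathlib
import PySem

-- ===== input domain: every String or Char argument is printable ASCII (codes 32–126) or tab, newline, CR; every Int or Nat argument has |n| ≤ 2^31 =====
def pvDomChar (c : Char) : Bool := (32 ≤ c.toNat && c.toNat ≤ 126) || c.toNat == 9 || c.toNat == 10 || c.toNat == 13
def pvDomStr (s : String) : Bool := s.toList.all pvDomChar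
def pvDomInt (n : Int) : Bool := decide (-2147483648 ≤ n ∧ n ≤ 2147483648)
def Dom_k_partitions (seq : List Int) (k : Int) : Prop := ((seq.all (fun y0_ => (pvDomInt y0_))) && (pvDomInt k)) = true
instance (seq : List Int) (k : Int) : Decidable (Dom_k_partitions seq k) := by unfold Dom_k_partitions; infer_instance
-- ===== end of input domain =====

-- B replaces A's recursive backtracking generator by a one-pass iterative
-- breadth-first enumeration over a frontier of immutable partial partitions
-- (objective: alternative decomposition, same cost).


-- ===== PORT A =====
-- A's recursive generator generate_partitions(i) over mutable `groups`;
-- the append/pop mutation pattern is ported functionally with List.set.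
def kpA_go (seq : List Int) (k : Int) (i : Nat) (groups : List (List Int)) :
    List (List (List Int)) :=
  if _h : seq.length ≤ i then [groups]
  else
    (if (seq.length : Int) - (i : Int) > k - (groups.length : Int) then
        (List.range groups.length).flatMap (fun j =>
          kpA_go seq k (i + 1) (groups.set j (groups[j]! ++ [seq[i]!])))
      else []) ++
    (if (groups.length : Int) < k then
        kpA_go seq k (i + 1) (groups ++ [[seq[i]!]])
      else [])
termination_by seq.length - i
decreasing_by all_goals omega

def k_partitions (seq : List Int) (k : Int) : List (List (List Int)) :=
  kpA_go seq k 0 []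

-- ===== PORT B =====
-- B: one pass over seq (with index i), expanding the whole frontier of
-- partial partitions at each step; the final frontier is the answer.
def kpB_step (n k : Int) (i : Nat) (x : Int) (groups : List (List Int)) :
    List (List (List Int)) :=
  (if n - (i : Int) > k - (groups.length : Int) then
      (List.range groups.length).map (fun j => groups.set j (groups[j]! ++ [x]))
    else []) ++
  (if (groups.length : Int) < k then [groups ++ [[x]]] else [])

def kpB_go (n k : Int) (i : Nat) (rest : List Int)
    (states : List (List (List Int))) : List (List (List Int)) :=
  match rest with
  | [] => states
  | x :: rest' => kpB_go n k (i + 1) rest' (states.flatMap (kpB_step n k i x))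

def k_partitions_alt (seq : List Int) (k : Int) : List (List (List Int)) :=
  kpB_go (seq.length : Int) k 0 seq [[]]

-- ===== PRECONDITION & SPEC =====
def Spec_k_partitions (seq : List Int) (k : Int) (out : List (List (List Int))) : Prop := out = k_partitions_alt seq k
instance (seq : List Int) (k : Int) (out : List (List (List Int))) : Decidable (Spec_k_partitions seq k out) := by unfold Spec_k_partitions; infer_instance

-- ===== CLAIM (what is proved, stated in full; the proofs are below) =====
def Claim_equal_k_partitions : Prop := ∀ (seq : List Int) (k : Int), Dom_k_partitions seq k → Spec_k_partitions seq k (k_partitions seq k)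

-- ===== LEMMAS AND PROOFS =====

-- one DFS step of A equals one frontier-expansion step of B
theorem kpA_go_step (seq : List Int) (k : Int) (i : Nat) (g : List (List Int))
    (h : i < seq.length) :
    kpA_go seq k i g =
      (kpB_step (seq.length : Int) k i (seq[i]!) g).flatMap (kpA_go seq k (i + 1)) := by
  rw [kpA_go, kpB_step]
  simp only [dif_neg (by omega : ¬ seq.length ≤ i)]
  rw [List.flatMap_append]
  congr 1
  · split_ifs <;> simp [List.flatMap_map]
  · split_ifs <;> simp

theorem kpB_go_eq (seq : List Int) (k : Int) :
    ∀ (rest : List Int) (i : Nat), rest = seq.drop i →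
      ∀ (states : List (List (List Int))),
        kpB_go (seq.length : Int) k i rest states =
          states.flatMap (kpA_go seq k i) := by
  intro rest
  induction rest with
  | nil =>
    intro i hd states
    have hlen : seq.length ≤ i := List.drop_eq_nil_iff.mp hd.symm
    have hA : ∀ g : List (List Int), kpA_go seq k i g = [g] := by
      intro g; rw [kpA_go]; simp [hlen]
    rw [kpB_go, show kpA_go seq k i = fun g => [g] from funext hA]
    simp
  | cons x rest' ih =>
    intro i hd states
    have hlt : i < seq.length := by
      by_contra h
      rw [List.drop_eq_nil_iff.mpr (by omega)] at hd
      simp at hd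
    have hget : seq[i]? = some x := by
      have h0 : (seq.drop i)[0]? = some x := by rw [← hd]; rfl
      rw [List.getElem?_drop] at h0
      simpa using h0
    have hx : seq[i]! = x := by
      simp [List.getElem!_eq_getElem?_getD, hget]
    have hrest : rest' = seq.drop (i + 1) := by
      have h0 : seq.drop (i + 1) = (seq.drop i).tail := by simp [List.tail_drop]
      rw [h0, ← hd]; rfl
    rw [kpB_go, ih (i + 1) hrest, List.flatMap_assoc]
    apply List.flatMap_congr
    intro g hg
    rw [kpA_go_step seq k i g hlt, hx]

-- ===== VERDICT (by name: the statement is the Claim_ definition above) =====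
theorem k_partitions_spec : Claim_equal_k_partitions := by
  intro seq k _
  unfold Spec_k_partitions k_partitions k_partitions_alt
  rw [kpB_go_eq seq k seq 0 (by simp) [[]]]
  simp
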